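-- pv_equiv track=rewrite | github.com/snefrukai/15-112 | extra_practice5.py | l_most_get
-- ===== SOURCE A (Python) =====
-- def l_most_get(l):
--     l_new = sorted(l, reverse=True)
--
--     count_max = l_new[0][0]
--     for i in range(1, len(l_new)):
--         if l_new[i][0] < count_max:
--             l_new = l_new[:i]
--             break
--     l_new.sort()
--     return l_new
-- ===== SOURCE B (Python) =====
-- def l_most_get(l):
--     s = sorted(l)
--     m = s[-1][0]
--     return [x for x in s if x[0] == m]
-- ===== Notes on version B (the rewrite author's own statement) =====
-- stated objective: simpler
-- what changed: One ascending sort plus a max-first-field filter comprehension replaces A's descending sort, index-loop truncation with break and slicing, and second ascending sort.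
import Mathlib
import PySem

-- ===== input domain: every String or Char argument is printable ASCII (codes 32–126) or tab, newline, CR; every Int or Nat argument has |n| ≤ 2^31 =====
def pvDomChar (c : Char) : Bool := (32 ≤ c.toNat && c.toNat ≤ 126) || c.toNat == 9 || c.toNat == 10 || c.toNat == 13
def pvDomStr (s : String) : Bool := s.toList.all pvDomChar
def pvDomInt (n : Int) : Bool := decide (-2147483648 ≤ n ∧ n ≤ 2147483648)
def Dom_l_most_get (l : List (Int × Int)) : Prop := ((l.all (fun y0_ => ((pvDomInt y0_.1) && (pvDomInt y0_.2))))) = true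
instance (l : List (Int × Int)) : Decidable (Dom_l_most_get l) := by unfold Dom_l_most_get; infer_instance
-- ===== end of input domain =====

-- B replaces A's descending sort + truncation loop + second sort with one ascending sort
-- and a max-first-field filter (objective: simpler); equal return value on all nonempty lists.

-- ===== PORT A =====
-- the 'for i in range(1, len(l_new)): if l_new[i][0] < count_max: l_new = l_new[:i]; break' loop
def lmgScan (l_new : List (Int × Int)) (count_max : Int) : List Int → List (Int × Int)
  | [] => l_new
  | i :: rest =>
    if (PySem.List.pyGetD l_new i (0, 0)).1 < count_max
    then PySem.List.slice l_new none (some i)      -- l_new[:i] then break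
    else lmgScan l_new count_max rest

def l_most_get (l : List (Int × Int)) : List (Int × Int) :=
  let l_new := PySem.List.sorted2 l (fun x => x.1) (fun x => x.2) true
  match PySem.List.pyGet? l_new 0 with
  | none => []              -- l_new[0] raises IndexError on empty input; excluded by Pre_
  | some first =>
    let count_max := first.1
    let l_new2 := lmgScan l_new count_max (PySem.List.pyRange 1 (l_new.length))
    PySem.List.sorted2 l_new2 (fun x => x.1) (fun x => x.2) false

-- ===== PORT B =====
def l_most_get_alt (l : List (Int × Int)) : List (Int × Int) :=
  let s := PySem.List.sorted2 l (fun x => x.1) (fun x => x.2) false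
  match PySem.List.pyGet? s (-1) with
  | none => []              -- s[-1] raises IndexError on empty input; excluded by Pre_
  | some last => s.filter (fun x => x.1 == last.1)

-- ===== PRECONDITION & SPEC =====
-- Python A (and B) raises IndexError on the empty list; that is the only excluded input.
def Pre_l_most_get (l : List (Int × Int)) : Prop := l ≠ []
instance (l : List (Int × Int)) : Decidable (Pre_l_most_get l) := by unfold Pre_l_most_get; infer_instance
def pvWitness_l_most_get : (List (Int × Int)) := [(1, 2), (3, 4), (3, 1)]

def Spec_l_most_get (l : List (Int × Int)) (out : List (Int × Int)) : Prop := out = l_most_get_alt l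
instance (l : List (Int × Int)) (out : List (Int × Int)) : Decidable (Spec_l_most_get l out) := by unfold Spec_l_most_get; infer_instance

-- ===== CLAIM (what is proved, stated in full; the proofs are below) =====
def Claim_equal_l_most_get : Prop := ∀ (l : List (Int × Int)), Dom_l_most_get l → Pre_l_most_get l → Spec_l_most_get l (l_most_get l)

-- ===== LEMMAS AND PROOFS =====

-- Python's tuple sort is the lexicographic sort: sorted2 with fst/snd = sorted with key toLex
theorem lmg_sorted2_eq_sorted (xs : List (Int × Int)) (rev : Bool) :
    PySem.List.sorted2 xs (fun x => x.1) (fun x => x.2) rev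
      = PySem.List.sorted xs (fun x => toLex x) rev := by
  have hlt : (fun (a b : Int × Int) => decide (a.1 < b.1) || (!decide (b.1 < a.1) && decide (a.2 < b.2)))
      = fun (a b : Int × Int) => decide (toLex a < toLex b) := by
    funext a b
    by_cases h1 : a.1 < b.1 <;> by_cases h2 : b.1 < a.1 <;> by_cases h3 : a.2 < b.2 <;>
      simp [Prod.Lex.toLex_lt_toLex, h1, h2, h3] <;> omega
  have hgt : (fun (a b : Int × Int) => decide (b.1 < a.1) || (!decide (a.1 < b.1) && decide (b.2 < a.2)))
      = fun (a b : Int × Int) => decide (toLex b < toLex a) := by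
    funext a b
    exact congrFun (congrFun hlt b) a
  unfold PySem.List.sorted2 PySem.List.sorted
  cases rev <;> simp [hlt, hgt]

theorem lmg_cut_spec (sd : List (Int × Int)) (cm : Int) :
    ∀ (n j : Nat), j ≤ sd.length → sd.length - j = n →
    lmgScan sd cm (PySem.List.pyRange (j : Int) (sd.length : Int))
      = sd.take j ++ (sd.drop j).takeWhile (fun x => !decide (x.1 < cm)) := by
  intro n
  induction n with
  | zero =>
    intro j hj hn
    have hje : j = sd.length := by omega
    subst hje
    rw [PySem.List.pyRange_one_eq_nil (by omega)]
    simp [lmgScan]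
  | succ n ih =>
    intro j hj hn
    have hjlt : j < sd.length := by omega
    rw [PySem.List.pyRange_one_cons (by exact_mod_cast hjlt)]
    have hget : PySem.List.pyGetD sd (j : Int) (0, 0) = sd[j] := by
      rw [PySem.List.pyGetD_natCast]
      exact List.getD_eq_getElem sd (0, 0) hjlt
    show (if (PySem.List.pyGetD sd (j : Int) (0, 0)).1 < cm
        then PySem.List.slice sd none (some (j : Int))
        else lmgScan sd cm (PySem.List.pyRange ((j : Int) + 1) (sd.length : Int)))
      = sd.take j ++ (sd.drop j).takeWhile (fun x => !decide (x.1 < cm))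
    rw [hget]
    by_cases hlt : (sd[j]).1 < cm
    · rw [if_pos hlt, PySem.List.slice_to sd (by omega)]
      rw [List.drop_eq_getElem_cons hjlt]
      simp [List.takeWhile_cons, hlt]
    · rw [if_neg hlt]
      have : ((j : Int) + 1) = ((j + 1 : Nat) : Int) := by push_cast; ring
      rw [this, ih (j + 1) (by omega) (by omega)]
      have hdj : sd.drop j = sd[j] :: sd.drop (j + 1) := List.drop_eq_getElem_cons hjlt
      have hg : sd[j]? = some sd[j] := List.getElem?_eq_getElem hjlt
      rw [hdj, List.takeWhile_cons, if_pos (by simp [hlt]), List.take_succ, hg]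
      simp only [Option.toList_some, List.append_assoc, List.singleton_append]

theorem lmg_takeWhile_eq_filter (cm : Int) :
    ∀ (xs : List (Int × Int)), (∀ x ∈ xs, x.1 ≤ cm) →
    xs.Pairwise (fun a b => b.1 ≤ a.1) →
    xs.takeWhile (fun x => !decide (x.1 < cm)) = xs.filter (fun x => x.1 == cm) := by
  intro xs
  induction xs with
  | nil => intro _ _; rfl
  | cons h t ih =>
    intro hle hpw
    by_cases hlt : h.1 < cm
    · have h1 : List.filter (fun x => x.1 == cm) t = [] := by
        rw [List.filter_eq_nil_iff]
        intro x hx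
        have : x.1 ≤ h.1 := (List.pairwise_cons.mp hpw).1 x hx
        simp; omega
      simp [List.takeWhile_cons, List.filter_cons, hlt, h1]
      omega
    · have heq : h.1 = cm := le_antisymm (hle h (List.mem_cons_self)) (by omega)
      have ht := ih (fun x hx => hle x (List.mem_cons_of_mem h hx)) (List.pairwise_cons.mp hpw).2
      simp [List.takeWhile_cons, List.filter_cons, hlt, heq, ht]

-- every first field of l is ≤ the first field of the head of the descending sort
theorem lmg_head_max (l : List (Int × Int)) {m : Int × Int} {t : List (Int × Int)}
    (h : PySem.List.sorted l (fun x => toLex x) true = m :: t) :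
    ∀ y ∈ l, y.1 ≤ m.1 := by
  intro y hy
  have := PySem.List.key_head_sorted_rev_ge l (fun x => toLex x) h y hy
  rcases Prod.Lex.toLex_le_toLex.mp this with h1 | ⟨h1, _⟩ <;> omega

-- every first field of l is ≤ the first field of the last element of the ascending sort
theorem lmg_last_max (l : List (Int × Int)) (hne : l ≠ [])
    (hlen : (PySem.List.sorted l (fun x => toLex x) false).length ≠ 0) :
    ∀ y ∈ l,
      y.1 ≤ ((PySem.List.sorted l (fun x => toLex x) false).getLast
              (by intro h; exact hlen (by simp [h]))).1 := by
  intro y hy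
  have hy' : y ∈ PySem.List.sorted l (fun x => toLex x) false :=
    (PySem.List.mem_sorted l _ _ y).mpr hy
  obtain ⟨p, hp, hyp⟩ := List.mem_iff_getElem.mp hy'
  have hlast : (PySem.List.sorted l (fun x => toLex x) false).getLast
        (by intro h; exact hlen (by simp [h]))
      = (PySem.List.sorted l (fun x => toLex x) false)[(PySem.List.sorted l (fun x => toLex x) false).length - 1] :=
    List.getLast_eq_getElem _
  have hmono := PySem.List.key_sorted_getElem_mono l (fun x => toLex x)
      (p := p) (q := (PySem.List.sorted l (fun x => toLex x) false).length - 1)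
      (by omega) (by omega)
  rw [hlast]
  rw [hyp] at hmono
  rcases Prod.Lex.toLex_le_toLex.mp hmono with h1 | ⟨h1, _⟩ <;> omega

theorem lmg_main (l : List (Int × Int)) (hne : l ≠ []) :
    l_most_get l = l_most_get_alt l := by
  unfold l_most_get l_most_get_alt
  simp only [lmg_sorted2_eq_sorted]
  set sd := PySem.List.sorted l (fun x => toLex x) true with hsd
  set sa := PySem.List.sorted l (fun x => toLex x) false with hsa
  have hsd_ne : sd ≠ [] := by
    rw [hsd]; rw [Ne, PySem.List.sorted_eq_nil_iff]; exact hne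
  have hsa_ne : sa ≠ [] := by
    rw [hsa]; rw [Ne, PySem.List.sorted_eq_nil_iff]; exact hne
  obtain ⟨m, t, hmt⟩ := List.exists_cons_of_ne_nil hsd_ne
  have hget0 : PySem.List.pyGet? sd 0 = some m := by
    rw [hmt]; exact PySem.List.pyGet?_zero_cons m t
  have hgetm1 : PySem.List.pyGet? sa (-1) = some (sa.getLast hsa_ne) := by
    rw [PySem.List.pyGet?_neg_one, List.getLast?_eq_getLast_of_ne_nil hsa_ne]
  simp only [hget0, hgetm1]
  -- the two maxima agree
  have hheadmax : ∀ y ∈ l, y.1 ≤ m.1 := lmg_head_max l (hsd ▸ hmt)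
  have hlastmem : sa.getLast hsa_ne ∈ l := by
    have := List.getLast_mem hsa_ne
    exact (PySem.List.mem_sorted l _ _ _).mp this
  have hmmem : m ∈ l := by
    have : m ∈ sd := by rw [hmt]; exact List.mem_cons_self
    exact (PySem.List.mem_sorted l _ _ _).mp this
  have hlastmax := lmg_last_max l hne (by simp [← hsa, List.length_eq_zero_iff, hsa_ne])
  have hmax_eq : (sa.getLast hsa_ne).1 = m.1 :=
    le_antisymm (hheadmax _ hlastmem) (hlastmax m hmmem)
  -- A's truncation is the filter of the descending sort
  have hscan : lmgScan sd m.1 (PySem.List.pyRange 1 (sd.length : Int))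
      = sd.filter (fun x => x.1 == m.1) := by
    have hlen1 : 1 ≤ sd.length := by
      rw [hmt]; simp
    have hcut := lmg_cut_spec sd m.1 (sd.length - 1) 1 hlen1 rfl
    push_cast at hcut
    rw [hcut]
    have hpw : sd.Pairwise (fun a b => b.1 ≤ a.1) := by
      have := PySem.List.sorted_pairwise_rev l (fun x => toLex x)
      rw [← hsd] at this
      exact this.imp (fun hab => by
        rcases Prod.Lex.toLex_le_toLex.mp hab with h1 | ⟨h1, _⟩ <;> omega)
    have hsdle : ∀ x ∈ sd, x.1 ≤ m.1 := fun x hx =>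
      hheadmax x ((PySem.List.mem_sorted l _ _ x).mp hx)
    have htw := lmg_takeWhile_eq_filter m.1 sd hsdle hpw
    rw [hmt] at htw ⊢
    have hm_not_lt : ¬ m.1 < m.1 := lt_irrefl _
    simp only [List.takeWhile_cons, List.filter_cons, hm_not_lt, decide_false,
      Bool.not_false, if_true] at htw ⊢
    simpa using htw
  rw [hscan]
  -- both sides are sorted rearrangements of the same filtered list: equal
  rw [hmax_eq]
  apply PySem.List.eq_of_perm_of_pairwise_le_of_injective (fun x : Int × Int => toLex x)
    (fun a b hab => toLex.injective hab)
  · exact ((PySem.List.sorted_perm _ _ _).trans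
      ((hsd ▸ PySem.List.sorted_perm l (fun x => toLex x) true).filter _)).trans
      ((hsa ▸ PySem.List.sorted_perm l (fun x => toLex x) false).filter _).symm
  · exact PySem.List.sorted_pairwise _ _
  · exact (hsa ▸ PySem.List.sorted_pairwise l (fun x => toLex x)).filter _

-- ===== VERDICT (by name: the statement is the Claim_ definition above) =====
theorem l_most_get_spec : Claim_equal_l_most_get := by
  intro l _ hpre
  unfold Spec_l_most_get
  exact lmg_main l hpre
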